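-- pv_equiv track=rewrite | github.com/liskos/zadanie25osipov | 15/286.py | f
-- ===== SOURCE A (Python) =====
-- def f(n):
--     k = 0
--     a = []
--     for i in range(27, 55):
--         a.append(i)
--     b = []
--     for i in range(32, 47):
--         b.append(i)
--     c = []
--     for i in range(n, 71):
--         c.append(i)
--     for x in range(1, 1000):
--         if (x not in a or x in b) and (x in c or x in b):
--             k += 1
--     if k > 25:
--         return True
--     return False
-- ===== SOURCE B (Python) =====
-- def f(n):
--     # Closed form: the predicate holds unconditionally on the middle block b,
--     # and otherwise exactly for x below or above block a with n <= x <= 70.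
--     k = 15 + max(0, 27 - max(1, n)) + max(0, 71 - max(55, n))
--     return k > 25
-- ===== Notes on version B (the rewrite author's own statement) =====
-- stated objective: simpler
-- what changed: Replaced the list-building and the per-candidate membership scan by a closed-form count: a fixed block of unconditional hits plus clamped interval counts for the two side ranges where the threshold n matters, compared against the cutoff.
import Mathlib
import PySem

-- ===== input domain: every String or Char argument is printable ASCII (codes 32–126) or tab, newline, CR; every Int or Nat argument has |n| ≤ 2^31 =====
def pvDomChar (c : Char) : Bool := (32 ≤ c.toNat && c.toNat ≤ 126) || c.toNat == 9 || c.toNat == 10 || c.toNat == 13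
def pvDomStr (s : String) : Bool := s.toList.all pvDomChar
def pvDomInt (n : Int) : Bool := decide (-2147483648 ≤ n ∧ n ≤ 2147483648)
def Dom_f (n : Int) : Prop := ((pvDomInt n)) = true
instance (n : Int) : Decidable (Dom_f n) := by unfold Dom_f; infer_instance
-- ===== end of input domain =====

-- B replaces A's list building and 999-iteration membership loop by a closed-form
-- clamped-interval count (simpler, constant work).

-- ===== PORT A =====
def f (n : Int) : Bool :=
  let a : List Int := (PySem.List.pyRange 27 55 1).foldl (fun acc i => acc ++ [i]) []
  let b : List Int := (PySem.List.pyRange 32 47 1).foldl (fun acc i => acc ++ [i]) []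
  let c : List Int := (PySem.List.pyRange n 71 1).foldl (fun acc i => acc ++ [i]) []
  let k : Int := (PySem.List.pyRange 1 1000 1).foldl
    (fun k x => if (¬ x ∈ a ∨ x ∈ b) ∧ (x ∈ c ∨ x ∈ b) then k + 1 else k) 0
  if k > 25 then true else false

-- ===== PORT B =====
def f_alt (n : Int) : Bool :=
  let k : Int := 15 + max 0 (27 - max 1 n) + max 0 (71 - max 55 n)
  decide (k > 25)

-- ===== PRECONDITION & SPEC =====
def Spec_f (n : Int) (out : Bool) : Prop := out = f_alt n
instance (n : Int) (out : Bool) : Decidable (Spec_f n out) := by unfold Spec_f; infer_instance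

-- ===== CLAIM (what is proved, stated in full; the proofs are below) =====
def Claim_equal_f : Prop := ∀ (n : Int), Dom_f n → Spec_f n (f n)

-- ===== LEMMAS AND PROOFS =====

-- the count of x in [lo, hi) with n ≤ x, as a clamped closed form (lo, hi concrete below)
lemma cnt_seg (lo hi n : Int) (h : lo ≤ hi) :
    ((PySem.List.pyRange lo hi 1).countP (fun x => decide (n ≤ x)) : Int)
      = max 0 (hi - max lo n) := by
  by_cases hn : n ≤ lo
  · have hall : ∀ x ∈ PySem.List.pyRange lo hi 1, (fun x => decide (n ≤ x)) x = true := by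
      intro x hx
      rw [PySem.List.mem_pyRange_one] at hx
      simp only [decide_eq_true_eq]
      omega
    rw [List.countP_eq_length.mpr hall, PySem.List.length_pyRange_one]
    omega
  · by_cases hn2 : hi ≤ n
    · have hno : ∀ x ∈ PySem.List.pyRange lo hi 1, ¬ ((fun x => decide (n ≤ x)) x = true) := by
        intro x hx
        rw [PySem.List.mem_pyRange_one] at hx
        simp only [decide_eq_true_eq]
        omega
      rw [List.countP_eq_zero.mpr hno]
      push_cast
      omega
    · have h0 : ∀ x ∈ PySem.List.pyRange lo n 1, ¬ ((fun x => decide (n ≤ x)) x = true) := by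
        intro x hx
        rw [PySem.List.mem_pyRange_one] at hx
        simp only [decide_eq_true_eq]
        omega
      have h1 : ∀ x ∈ PySem.List.pyRange n hi 1, (fun x => decide (n ≤ x)) x = true := by
        intro x hx
        rw [PySem.List.mem_pyRange_one] at hx
        simp only [decide_eq_true_eq]
        omega
      rw [PySem.List.pyRange_one_append lo n hi (by omega) (by omega), List.countP_append,
          List.countP_eq_zero.mpr h0, List.countP_eq_length.mpr h1, PySem.List.length_pyRange_one]
      push_cast
      omega

lemma f_eq_alt (n : Int) : f n = f_alt n := by
  unfold f f_alt
  simp only [PySem.List.foldl_append_singleton_eq_self, List.nil_append,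
    PySem.List.foldl_ite_add_one]
  have hsplit : PySem.List.pyRange 1 1000 1
      = PySem.List.pyRange 1 27 1 ++ PySem.List.pyRange 27 32 1 ++ PySem.List.pyRange 32 47 1
        ++ PySem.List.pyRange 47 55 1 ++ PySem.List.pyRange 55 71 1
        ++ PySem.List.pyRange 71 1000 1 := by
    rw [PySem.List.pyRange_one_append 1 27 1000 (by omega) (by omega),
        PySem.List.pyRange_one_append 27 32 1000 (by omega) (by omega),
        PySem.List.pyRange_one_append 32 47 1000 (by omega) (by omega),
        PySem.List.pyRange_one_append 47 55 1000 (by omega) (by omega),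
        PySem.List.pyRange_one_append 55 71 1000 (by omega) (by omega)]
    simp [List.append_assoc]
  rw [hsplit]
  simp only [List.countP_append]
  have hmem : ∀ x : Int, (x ∈ PySem.List.pyRange 27 55 1 ↔ 27 ≤ x ∧ x < 55)
      ∧ (x ∈ PySem.List.pyRange 32 47 1 ↔ 32 ≤ x ∧ x < 47)
      ∧ (x ∈ PySem.List.pyRange n 71 1 ↔ n ≤ x ∧ x < 71) := by
    intro x
    exact ⟨PySem.List.mem_pyRange_one, PySem.List.mem_pyRange_one, PySem.List.mem_pyRange_one⟩
  -- segment [1,27): predicate ↔ n ≤ x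
  have h1 : (PySem.List.pyRange 1 27 1).countP
      (fun x => decide ((¬ x ∈ PySem.List.pyRange 27 55 1 ∨ x ∈ PySem.List.pyRange 32 47 1)
        ∧ (x ∈ PySem.List.pyRange n 71 1 ∨ x ∈ PySem.List.pyRange 32 47 1)))
      = (PySem.List.pyRange 1 27 1).countP (fun x => decide (n ≤ x)) := by
    apply List.countP_congr
    intro x hx
    rw [PySem.List.mem_pyRange_one] at hx
    obtain ⟨ha, hb, hc⟩ := hmem x
    simp only [decide_eq_true_eq, ha, hb, hc]
    constructor
    · rintro ⟨-, hc2 | hb2⟩ <;> omega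
    · intro hnx; exact ⟨by omega, Or.inl ⟨hnx, by omega⟩⟩
  -- segment [27,32): predicate false
  have h2 : (PySem.List.pyRange 27 32 1).countP
      (fun x => decide ((¬ x ∈ PySem.List.pyRange 27 55 1 ∨ x ∈ PySem.List.pyRange 32 47 1)
        ∧ (x ∈ PySem.List.pyRange n 71 1 ∨ x ∈ PySem.List.pyRange 32 47 1))) = 0 := by
    apply List.countP_eq_zero.mpr
    intro x hx
    rw [PySem.List.mem_pyRange_one] at hx
    obtain ⟨ha, hb, hc⟩ := hmem x
    simp only [decide_eq_true_eq, ha, hb, hc]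
    rintro ⟨h1 | h2, -⟩ <;> omega
  -- segment [32,47): predicate true
  have h3 : (PySem.List.pyRange 32 47 1).countP
      (fun x => decide ((¬ x ∈ PySem.List.pyRange 27 55 1 ∨ x ∈ PySem.List.pyRange 32 47 1)
        ∧ (x ∈ PySem.List.pyRange n 71 1 ∨ x ∈ PySem.List.pyRange 32 47 1))) = 15 := by
    rw [List.countP_eq_length.mpr]
    · simp [PySem.List.length_pyRange_one]
    · intro x hx
      rw [PySem.List.mem_pyRange_one] at hx
      obtain ⟨ha, hb, hc⟩ := hmem x
      simp only [decide_eq_true_eq, ha, hb, hc]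
      exact ⟨Or.inr (by omega), Or.inr (by omega)⟩
  -- segment [47,55): predicate false
  have h4 : (PySem.List.pyRange 47 55 1).countP
      (fun x => decide ((¬ x ∈ PySem.List.pyRange 27 55 1 ∨ x ∈ PySem.List.pyRange 32 47 1)
        ∧ (x ∈ PySem.List.pyRange n 71 1 ∨ x ∈ PySem.List.pyRange 32 47 1))) = 0 := by
    apply List.countP_eq_zero.mpr
    intro x hx
    rw [PySem.List.mem_pyRange_one] at hx
    obtain ⟨ha, hb, hc⟩ := hmem x
    simp only [decide_eq_true_eq, ha, hb, hc]
    rintro ⟨h1 | h2, -⟩ <;> omega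
  -- segment [55,71): predicate ↔ n ≤ x
  have h5 : (PySem.List.pyRange 55 71 1).countP
      (fun x => decide ((¬ x ∈ PySem.List.pyRange 27 55 1 ∨ x ∈ PySem.List.pyRange 32 47 1)
        ∧ (x ∈ PySem.List.pyRange n 71 1 ∨ x ∈ PySem.List.pyRange 32 47 1)))
      = (PySem.List.pyRange 55 71 1).countP (fun x => decide (n ≤ x)) := by
    apply List.countP_congr
    intro x hx
    rw [PySem.List.mem_pyRange_one] at hx
    obtain ⟨ha, hb, hc⟩ := hmem x
    simp only [decide_eq_true_eq, ha, hb, hc]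
    constructor
    · rintro ⟨-, hc2 | hb2⟩ <;> omega
    · intro hnx; exact ⟨by omega, Or.inl ⟨hnx, by omega⟩⟩
  -- segment [71,1000): predicate false
  have h6 : (PySem.List.pyRange 71 1000 1).countP
      (fun x => decide ((¬ x ∈ PySem.List.pyRange 27 55 1 ∨ x ∈ PySem.List.pyRange 32 47 1)
        ∧ (x ∈ PySem.List.pyRange n 71 1 ∨ x ∈ PySem.List.pyRange 32 47 1))) = 0 := by
    apply List.countP_eq_zero.mpr
    intro x hx
    rw [PySem.List.mem_pyRange_one] at hx
    obtain ⟨ha, hb, hc⟩ := hmem x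
    simp only [decide_eq_true_eq, ha, hb, hc]
    rintro ⟨-, hc2 | hb2⟩ <;> omega
  rw [h1, h2, h3, h4, h5, h6]
  have c1 := cnt_seg 1 27 n (by omega)
  have c2 := cnt_seg 55 71 n (by omega)
  split_ifs with hk
  · symm
    simp only [decide_eq_true_eq]
    omega
  · symm
    simp only [decide_eq_false_iff_not]
    omega

-- ===== VERDICT (by name: the statement is the Claim_ definition above) =====
theorem f_spec : Claim_equal_f := by
  intro n _
  unfold Spec_f
  exact f_eq_alt n
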